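-- pv_equiv track=rewrite | github.com/yuxin101/skills | skills/newageinvestments25-byte/nai-workflow-crystallizer/scripts/generate_suggestions.py | skill_covers_cluster
-- ===== SOURCE A (Python) =====
-- def skill_covers_cluster(skill_names: list[str], cluster: dict) -> bool:
--     """Check if an existing skill already covers this cluster's pattern."""
--     cluster_keywords = set(k.lower() for k in cluster.get("top_keywords", []))
--     cluster_entities = set(e.lower() for e in cluster.get("top_entities", []))
--
--     for name in skill_names:
--         # Fuzzy match: skill name tokens overlap with cluster keywords
--         name_tokens = set(name.replace("-", " ").replace("_", " ").split())
--         if len(name_tokens & cluster_keywords) >= 1: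
--             return True
--         if name in cluster_entities:
--             return True
--
--     return False
-- ===== SOURCE B (Python) =====
-- def skill_covers_cluster(skill_names: list[str], cluster: dict) -> bool:
--     """Check if an existing skill already covers this cluster's pattern.
--
--     Aggregate formulation: pool every name's tokens into one set, then do two
--     set-intersection tests instead of a per-name loop with early returns."""
--     cluster_keywords = set(k.lower() for k in cluster.get("top_keywords", []))
--     cluster_entities = set(e.lower() for e in cluster.get("top_entities", []))
--
--     all_tokens = set()
--     for name in skill_names:
--         all_tokens.update(name.replace("-", " ").replace("_", " ").split())
--
--     return bool(all_tokens & cluster_keywords) or bool(set(skill_names) & cluster_entities)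
-- ===== Notes on version B (the rewrite author's own statement) =====
-- stated objective: simpler
-- what changed: B replaces A's per-name loop with two early returns by one aggregate pass that pools all name tokens into a single set, then answers with two whole-set intersection tests (tokens vs lowered keywords, raw names vs lowered entities).
import Mathlib
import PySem

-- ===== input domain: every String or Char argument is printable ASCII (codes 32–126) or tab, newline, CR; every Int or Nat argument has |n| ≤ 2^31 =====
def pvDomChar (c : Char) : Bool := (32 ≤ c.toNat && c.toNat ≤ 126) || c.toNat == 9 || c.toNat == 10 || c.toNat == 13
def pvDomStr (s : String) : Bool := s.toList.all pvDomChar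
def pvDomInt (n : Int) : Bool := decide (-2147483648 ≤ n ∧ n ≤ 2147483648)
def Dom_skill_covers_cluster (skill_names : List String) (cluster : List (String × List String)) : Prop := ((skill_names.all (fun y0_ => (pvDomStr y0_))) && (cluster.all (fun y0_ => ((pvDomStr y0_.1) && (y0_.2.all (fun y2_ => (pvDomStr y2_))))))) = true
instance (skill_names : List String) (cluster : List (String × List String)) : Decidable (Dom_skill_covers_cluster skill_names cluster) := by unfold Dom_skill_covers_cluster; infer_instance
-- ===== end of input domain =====

-- B replaces A's per-name loop (early return on first hit) by one aggregate pass that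
-- pools all name tokens into a single set and answers with two whole-set intersection
-- tests; objective: simpler.

-- shared subcomputation: name.replace("-", " ").replace("_", " ").split()
def sccTokens (name : String) : List String :=
  PySem.Str.split₀ (PySem.Str.replace (PySem.Str.replace name "-" " ") "_" " ")

-- ===== PORT A =====
-- the for-loop over skill_names with its two early returns
def sccLoopA (cluster_keywords cluster_entities : PySem.Set String) : List String → Bool
  | [] => false
  | name :: rest =>
    let name_tokens : PySem.Set String := PySem.Set.ofList (sccTokens name)
    if 1 ≤ PySem.Set.len (PySem.Set.inter name_tokens cluster_keywords) then true
    else if PySem.Set.contains cluster_entities name then true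
    else sccLoopA cluster_keywords cluster_entities rest

def skill_covers_cluster (skill_names : List String) (cluster : List (String × List String)) : Bool :=
  let cluster_keywords : PySem.Set String :=
    PySem.Set.ofList (((PySem.Dict.mk cluster).getD "top_keywords" []).map PySem.Str.lower)
  let cluster_entities : PySem.Set String :=
    PySem.Set.ofList (((PySem.Dict.mk cluster).getD "top_entities" []).map PySem.Str.lower)
  sccLoopA cluster_keywords cluster_entities skill_names

-- ===== PORT B =====
def skill_covers_cluster_alt (skill_names : List String) (cluster : List (String × List String)) : Bool :=
  let cluster_keywords : PySem.Set String :=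
    PySem.Set.ofList (((PySem.Dict.mk cluster).getD "top_keywords" []).map PySem.Str.lower)
  let cluster_entities : PySem.Set String :=
    PySem.Set.ofList (((PySem.Dict.mk cluster).getD "top_entities" []).map PySem.Str.lower)
  let all_tokens : PySem.Set String :=
    skill_names.foldl (fun s name => PySem.Set.update s (sccTokens name)) PySem.Set.empty
  !(PySem.Set.inter all_tokens cluster_keywords).isEmpty ||
    !(PySem.Set.inter (PySem.Set.ofList skill_names) cluster_entities).isEmpty

-- ===== PRECONDITION & SPEC =====
def Spec_skill_covers_cluster (skill_names : List String) (cluster : List (String × List String)) (out : Bool) : Prop := out = skill_covers_cluster_alt skill_names cluster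
instance (skill_names : List String) (cluster : List (String × List String)) (out : Bool) : Decidable (Spec_skill_covers_cluster skill_names cluster out) := by unfold Spec_skill_covers_cluster; infer_instance

-- ===== CLAIM (what is proved, stated in full; the proofs are below) =====
def Claim_equal_skill_covers_cluster : Prop := ∀ (skill_names : List String) (cluster : List (String × List String)), Dom_skill_covers_cluster skill_names cluster → Spec_skill_covers_cluster skill_names cluster (skill_covers_cluster skill_names cluster)

-- ===== LEMMAS AND PROOFS =====

-- a Set intersection is nonempty iff the two member sets share an element
theorem scc_inter_ne_nil_iff (s t : List String) :
    PySem.Set.inter s t ≠ [] ↔ ∃ y, y ∈ s ∧ y ∈ t := by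
  constructor
  · intro h
    obtain ⟨y, hy⟩ := List.exists_mem_of_ne_nil _ h
    exact ⟨y, (PySem.Set.mem_inter s t y).mp hy⟩
  · rintro ⟨y, hs, ht⟩
    exact List.ne_nil_of_mem ((PySem.Set.mem_inter s t y).mpr ⟨hs, ht⟩)

-- membership in B's pooled token set
theorem scc_mem_foldl_update (names : List String) (s0 : PySem.Set String) (y : String) :
    y ∈ names.foldl (fun s name => PySem.Set.update s (sccTokens name)) s0 ↔
      y ∈ s0 ∨ ∃ n ∈ names, y ∈ sccTokens n := by
  induction names generalizing s0 with
  | nil => simp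
  | cons n rest ih =>
    simp only [List.foldl_cons, ih, PySem.Set.mem_update, List.mem_cons]
    constructor
    · rintro ((h | h) | ⟨m, hm, hy⟩)
      · exact Or.inl h
      · exact Or.inr ⟨n, Or.inl rfl, h⟩
      · exact Or.inr ⟨m, Or.inr hm, hy⟩
    · rintro (h | ⟨m, (rfl | hm), hy⟩)
      · exact Or.inl (Or.inl h)
      · exact Or.inl (Or.inr hy)
      · exact Or.inr ⟨m, hm, hy⟩

-- characterisation of A's loop
theorem scc_loopA_iff (kw ents : PySem.Set String) (names : List String) :
    sccLoopA kw ents names = true ↔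
      ∃ n ∈ names, (∃ t ∈ sccTokens n, t ∈ kw) ∨ n ∈ ents := by
  induction names with
  | nil => simp [sccLoopA]
  | cons n rest ih =>
    simp only [sccLoopA]
    split_ifs with h1 h2
    · simp only [true_iff]
      have hne : PySem.Set.inter (PySem.Set.ofList (sccTokens n)) kw ≠ [] := by
        intro hnil
        simp [PySem.Set.len, hnil] at h1
      obtain ⟨y, hy1, hy2⟩ := (scc_inter_ne_nil_iff _ _).mp hne
      exact ⟨n, List.mem_cons_self, Or.inl ⟨y, (PySem.Set.mem_ofList _ _).mp hy1, hy2⟩⟩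
    · simp only [true_iff]
      exact ⟨n, List.mem_cons_self, Or.inr ((PySem.Set.contains_iff _ _).mp h2)⟩
    · rw [ih]
      constructor
      · rintro ⟨m, hm, h⟩
        exact ⟨m, List.mem_cons_of_mem _ hm, h⟩
      · rintro ⟨m, hm, h⟩
        rcases List.mem_cons.mp hm with rfl | hm'
        · rcases h with ⟨t, ht, htk⟩ | hent
          · exfalso
            apply h1
            have : PySem.Set.inter (PySem.Set.ofList (sccTokens m)) kw ≠ [] :=
              (scc_inter_ne_nil_iff _ _).mpr ⟨t, (PySem.Set.mem_ofList _ _).mpr ht, htk⟩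
            have hpos : 0 < (PySem.Set.inter (PySem.Set.ofList (sccTokens m)) kw).length :=
              List.length_pos_iff.mpr this
            simp only [PySem.Set.len]
            omega
          · exact absurd ((PySem.Set.contains_iff _ _).mpr hent) h2
        · exact ⟨m, hm', h⟩

-- ===== VERDICT (by name: the statement is the Claim_ definition above) =====
theorem skill_covers_cluster_spec : Claim_equal_skill_covers_cluster := by
  intro names cluster _
  show skill_covers_cluster names cluster = skill_covers_cluster_alt names cluster
  rw [Bool.eq_iff_iff]
  unfold skill_covers_cluster skill_covers_cluster_alt
  simp only [Bool.or_eq_true, Bool.not_eq_true', List.isEmpty_eq_false_iff,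
    scc_loopA_iff, scc_inter_ne_nil_iff, scc_mem_foldl_update, PySem.Set.mem_ofList,
    PySem.Set.empty, List.not_mem_nil, false_or]
  constructor
  · rintro ⟨n, hn, ⟨t, ht, htk⟩ | hent⟩
    · exact Or.inl ⟨t, ⟨n, hn, ht⟩, htk⟩
    · exact Or.inr ⟨n, hn, hent⟩
  · rintro (⟨t, ⟨n, hn, ht⟩, htk⟩ | ⟨n, hn, hent⟩)
    · exact ⟨n, hn, Or.inl ⟨t, ht, htk⟩⟩
    · exact ⟨n, hn, Or.inr hent⟩
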